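-- pv_equiv track=rewrite | github.com/surpmh/algorithms | Programmers/level1/140108.py | solution
-- ===== SOURCE A (Python) =====
-- def solution(s):
--     answer = 0
--     arr = []
--
--     for i in s:
--         arr.append(i)
--
--         if len(arr) > 1 and arr.count(arr[0]) == len(arr) - arr.count(arr[0]):
--             arr = []
--             answer += 1
--
--     if arr:
--         answer += 1
--
--     return answer
-- ===== SOURCE B (Python) =====
-- def solution(s):
--     n = len(s)
--     answer = 0
--     start = 0
--     while start < n:
--         answer += 1
--         first = s[start]
--         bal = 0
--         j = start
--         while True:
--             bal += 1 if s[j] == first else -1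
--             j += 1
--             if bal == 0 or j == n:
--                 break
--         start = j
--     return answer
-- ===== Notes on version B (the rewrite author's own statement) =====
-- stated objective: alternative
-- what changed: Instead of A's single loop that rebuilds a segment list and rescans it with arr.count at every character, B is an index-based two-level scan: an outer loop counts one segment per iteration and an inner scan finds the segment's end as the first point where a running +1/-1 balance of first-char matches reaches zero, with no list and no rescans.
import Mathlib
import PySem

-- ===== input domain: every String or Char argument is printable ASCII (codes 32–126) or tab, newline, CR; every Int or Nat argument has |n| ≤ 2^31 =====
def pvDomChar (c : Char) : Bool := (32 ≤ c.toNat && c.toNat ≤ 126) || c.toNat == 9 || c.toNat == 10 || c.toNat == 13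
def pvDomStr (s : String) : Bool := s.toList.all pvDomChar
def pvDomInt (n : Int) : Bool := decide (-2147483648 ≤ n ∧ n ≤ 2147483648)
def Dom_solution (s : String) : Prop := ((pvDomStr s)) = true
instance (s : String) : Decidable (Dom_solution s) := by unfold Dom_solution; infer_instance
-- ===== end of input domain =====

-- B replaces A's growing segment list rescanned with arr.count per character by an index-based
-- two-level scan: the outer loop counts one segment per iteration, the inner scan finds the
-- segment end as the first point where a running +1/-1 first-char balance reaches zero.


-- ===== PORT A =====
-- one iteration of A's for-loop; state = (answer, arr). arr[0] is ported as arr.headD c, exact here since arr has just had c appended and is nonempty.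
def solutionStepA (st : Int × List Char) (c : Char) : Int × List Char :=
  let arr := st.2 ++ [c]
  if arr.length > 1 ∧ ((PySem.List.count arr (arr.headD c) : Int) = (arr.length : Int) - (PySem.List.count arr (arr.headD c) : Int)) then
    (st.1 + 1, [])
  else
    (st.1, arr)

def solution (s : String) : Int :=
  let st := s.toList.foldl solutionStepA (0, [])
  if st.2 ≠ [] then st.1 + 1 else st.1

-- ===== PORT B =====
-- inner 'while True' loop of Source B (bal and j updates inlined); the fuel argument (always called
-- with s.length - j, never exhausted since the Python loop stops at j = n) and the 'j < s.length'
-- guard only make the recursion structural (the Python loop keeps j < n as an invariant).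
def solutionInnerB (s : List Char) (first : Char) : Nat → Int → Nat → Nat
  | 0, _, j => j
  | fuel + 1, bal, j =>
    if _h : j < s.length then
      if bal + (if s[j] = first then 1 else -1) = 0 ∨ j + 1 = s.length then j + 1
      else solutionInnerB s first fuel (bal + (if s[j] = first then 1 else -1)) (j + 1)
    else j

-- outer while loop of Source B; state = (answer, start); new start = one inner-loop run.
def solutionOuterB (s : List Char) : Nat → Int → Nat → Int
  | 0, answer, _ => answer
  | fuel + 1, answer, start =>
    if _h : start < s.length then
      solutionOuterB s fuel (answer + 1) (solutionInnerB s s[start] (s.length - start) 0 start)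
    else answer

def solution_alt (s : String) : Int := solutionOuterB s.toList s.toList.length 0 0

-- ===== PRECONDITION & SPEC =====
def Spec_solution (s : String) (out : Int) : Prop := out = solution_alt s
instance (s : String) (out : Int) : Decidable (Spec_solution s out) := by unfold Spec_solution; infer_instance

-- ===== CLAIM (what is proved, stated in full; the proofs are below) =====
def Claim_equal_solution : Prop := ∀ (s : String), Dom_solution s → Spec_solution s (solution s)

-- ===== LEMMAS AND PROOFS =====

/-- Abstract cut finder: index of the first position where the running balance
(+1 on `f`, -1 otherwise, starting at `bal`) reaches zero. -/
def findCut (f : Char) (bal : Int) : List Char → Option Nat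
  | [] => none
  | c :: t =>
    if bal + (if c = f then 1 else -1) = 0 then some 0
    else (findCut f (bal + (if c = f then 1 else -1)) t).map (· + 1)

/-- Balance of a segment list w.r.t. a char `f`. -/
def balInt (f : Char) (l : List Char) : Int :=
  2 * (l.count f : Int) - (l.length : Int)

theorem balInt_append (f c : Char) (l : List Char) :
    balInt f (l ++ [c]) = balInt f l + (if c = f then 1 else -1) := by
  by_cases h : c = f <;> simp [balInt, List.count_append, h] <;> ring

/-- A's final wrap-up of the fold. -/
def aFin (l : List Char) : Int :=
  let st := l.foldl solutionStepA (0, [])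
  if st.2 ≠ [] then st.1 + 1 else st.1

theorem stepA_shift (ans : Int) (p : List Char) (c : Char) :
    solutionStepA (ans, p) c
      = (ans + (solutionStepA (0, p) c).1, (solutionStepA (0, p) c).2) := by
  simp only [solutionStepA]
  split_ifs <;> simp

theorem foldA_shift (l : List Char) (ans : Int) (p : List Char) :
    l.foldl solutionStepA (ans, p)
      = (ans + (l.foldl solutionStepA (0, p)).1, (l.foldl solutionStepA (0, p)).2) := by
  induction l generalizing ans p with
  | nil => simp
  | cons c l ih =>
    simp only [List.foldl_cons]
    rw [stepA_shift ans p c]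
    cases hB : solutionStepA ((0 : Int), p) c with
    | mk b1 b2 =>
      simp only
      rw [ih (ans + b1) b2, ih b1 b2]
      simp [add_assoc]

/-- A's fold over one segment, characterised by `findCut`. -/
theorem foldA_seg (f : Char) (l : List Char) : ∀ (ans : Int) (p : List Char),
    p ≠ [] → p.headD f = f →
    l.foldl solutionStepA (ans, p)
      = match findCut f (balInt f p) l with
        | some i => (l.drop (i + 1)).foldl solutionStepA (ans + 1, [])
        | none => (ans, p ++ l) := by
  induction l with
  | nil => intro ans p hp hh; simp [findCut]
  | cons c l ih =>
    intro ans p hp hh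
    obtain ⟨t, rfl⟩ : ∃ t, p = f :: t := by
      cases p with
      | nil => exact (hp rfl).elim
      | cons a b =>
        have ha : a = f := by simpa using hh
        exact ⟨b, by rw [ha]⟩
    have hcond : (((f :: t) ++ [c]).length > 1 ∧
        ((PySem.List.count ((f :: t) ++ [c]) (((f :: t) ++ [c]).headD c) : Int)
          = (((f :: t) ++ [c]).length : Int)
            - (PySem.List.count ((f :: t) ++ [c]) (((f :: t) ++ [c]).headD c) : Int)))
        ↔ balInt f (f :: t) + (if c = f then 1 else -1) = 0 := by
      rw [← balInt_append f c (f :: t)]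
      constructor
      · rintro ⟨-, h2⟩
        simp only [PySem.List.count_eq, List.cons_append, List.headD_cons] at h2
        simp only [balInt, List.cons_append]
        omega
      · intro h2
        simp only [balInt, List.cons_append] at h2
        refine ⟨by simp, ?_⟩
        simp only [PySem.List.count_eq, List.cons_append, List.headD_cons]
        omega
    simp only [List.foldl_cons, solutionStepA, findCut]
    by_cases hb : balInt f (f :: t) + (if c = f then 1 else -1) = 0
    · rw [if_pos (hcond.mpr hb), if_pos hb]
      simp
    · rw [if_neg (fun hx => hb (hcond.mp hx)), if_neg hb]
      have step := ih ans ((f :: t) ++ [c]) (by simp) (by simp)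
      rw [balInt_append] at step
      rw [step]
      cases hfc : findCut f (balInt f (f :: t) + (if c = f then 1 else -1)) l with
      | none => simp
      | some i => simp

/-- Recursive characterisation of A's result on a nonempty list. -/
theorem aFin_cons (f : Char) (t : List Char) :
    aFin (f :: t)
      = 1 + match findCut f 1 t with
            | some i => aFin (t.drop (i + 1))
            | none => 0 := by
  unfold aFin
  simp only [List.foldl_cons]
  have hstep : solutionStepA (0, []) f = (0, [f]) := by
    simp [solutionStepA, PySem.List.count_eq]
  rw [hstep]
  have hb : balInt f [f] = 1 := by simp [balInt]
  have hseg := foldA_seg f t 0 [f] (by simp) (by simp)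
  rw [hb] at hseg
  rw [hseg]
  cases hfc : findCut f 1 t with
  | none => simp
  | some i =>
    simp only
    rw [foldA_shift]
    split_ifs with h <;> simp [add_comm]

theorem aFin_nil : aFin [] = 0 := by simp [aFin]

/-- Bridge: the inner index scan (with its exact fuel) equals the abstract cut finder. -/
theorem innerB_eq (s : List Char) (f : Char) : ∀ (n j : Nat), s.length - j = n →
    ∀ (bal : Int), j < s.length →
    solutionInnerB s f n bal j
      = match findCut f bal (s.drop j) with
        | some i => j + i + 1
        | none => s.length := by
  intro n
  induction n using Nat.strong_induction_on with
  | _ n ih =>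
    intro j hn bal hj
    obtain ⟨m, rfl⟩ : ∃ m, n = m + 1 := ⟨n - 1, by omega⟩
    have hdrop : s.drop j = s[j] :: s.drop (j + 1) := List.drop_eq_getElem_cons hj
    rw [solutionInnerB, dif_pos hj, hdrop]
    simp only [findCut]
    by_cases hb : bal + (if s[j] = f then 1 else -1) = 0
    · rw [if_pos hb, if_pos (Or.inl hb)]
    · rw [if_neg hb]
      by_cases hend : j + 1 = s.length
      · rw [if_pos (Or.inr hend)]
        simp [findCut, hend]
      · rw [if_neg (by tauto)]
        have hm : m = s.length - (j + 1) := by omega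
        rw [hm, ih (s.length - (j + 1)) (by omega) (j + 1) rfl _ (by omega)]
        cases hfc : findCut f (bal + (if s[j] = f then 1 else -1)) (s.drop (j + 1)) with
        | none => rfl
        | some i =>
          show j + 1 + i + 1 = j + (i + 1) + 1
          omega

/-- Main coupling: B's outer loop from `start`, given enough fuel, computes
`answer + aFin (drop start)`. -/
theorem outerB_eq (s : List Char) : ∀ (n : Nat), ∀ (fuel : Nat), n ≤ fuel →
    ∀ (start : Nat), s.length - start = n → ∀ (answer : Int),
    solutionOuterB s fuel answer start = answer + aFin (s.drop start) := by
  intro n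
  induction n using Nat.strong_induction_on with
  | _ n ih =>
    intro fuel hfuel start hn answer
    by_cases h : start < s.length
    · obtain ⟨k, rfl⟩ : ∃ k, fuel = k + 1 := ⟨fuel - 1, by omega⟩
      have hdrop : s.drop start = s[start] :: s.drop (start + 1) := List.drop_eq_getElem_cons h
      rw [solutionOuterB, dif_pos h,
        innerB_eq s s[start] (s.length - start) start rfl 0 h, hdrop]
      have hcut0 : findCut s[start] 0 (s[start] :: s.drop (start + 1))
          = (findCut s[start] 1 (s.drop (start + 1))).map (· + 1) := by
        simp [findCut]
      rw [hcut0, aFin_cons]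
      cases hfc : findCut s[start] 1 (s.drop (start + 1)) with
      | none =>
        show solutionOuterB s k (answer + 1) s.length = answer + (1 + 0)
        rw [ih 0 (by omega) k (by omega) s.length (by omega)]
        have hnil : s.drop s.length = [] := by simp
        rw [hnil, aFin_nil]
        ring
      | some i =>
        show solutionOuterB s k (answer + 1) (start + (i + 1) + 1)
            = answer + (1 + aFin ((s.drop (start + 1)).drop (i + 1)))
        rw [ih (s.length - (start + (i + 1) + 1)) (by omega) k (by omega)
          (start + (i + 1) + 1) (by omega)]
        have hdd : (s.drop (start + 1)).drop (i + 1) = s.drop (start + (i + 1) + 1) := by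
          rw [List.drop_drop]; congr 1; omega
        rw [hdd]
        ring
    · cases fuel with
      | zero => rw [solutionOuterB]; have hnil : s.drop start = [] := by rw [List.drop_eq_nil_iff]; omega
                rw [hnil, aFin_nil]; ring
      | succ k => rw [solutionOuterB, dif_neg h]
                  have hnil : s.drop start = [] := by rw [List.drop_eq_nil_iff]; omega
                  rw [hnil, aFin_nil]; ring

-- ===== VERDICT (by name: the statement is the Claim_ definition above) =====
theorem solution_spec : Claim_equal_solution := by
  intro s _
  unfold Spec_solution solution solution_alt
  rw [outerB_eq s.toList (s.toList.length - 0) s.toList.length (by omega) 0 rfl 0]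
  simp [aFin]
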